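-- pv_equiv track=rewrite | github.com/YS-2357/Coding_Test | Programmers/etc/[문제5]_커스텀_키보드-격자에서의-맨해튼_거리.py | total_complexity
-- ===== SOURCE A (Python) =====
-- def total_complexity(s: str) -> int:
--     # 1) 키보드 배치와 좌표 매핑
--     row0 = "qwertyui"  # 9개
--     row1 = "pasdfghjk" # 9개
--     row2 = "lzxcvbnm"  # 8개
--
--     pos = {}
--     for r, row in enumerate([row0, row1, row2]):
--         for c, ch in enumerate(row):
--             pos[ch] = (r, c)
--
--     # 2) 인접 쌍 거리 미리 계산
--     n = len(s)
--     # 안전을 위해 소문자로 가정(입력이 소문자라고 했으니)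
--     s = s.lower()
--
--     def dist(a: str, b: str) -> int:
--         ra, ca = pos[a]
--         rb, cb = pos[b]
--         return abs(ra - rb) + abs(ca - cb)
--
--     # 3) 간선 i(=s[i], s[i+1])의 기여도: d_i * (i+1) * (n-i-1)
--     ans = 0
--     for i in range(n - 1):
--         d = dist(s[i], s[i + 1])
--         weight = (i + 1) * (n - i - 1)
--         ans += d * weight
--     return ans
-- ===== SOURCE B (Python) =====
-- def total_complexity(s: str) -> int:
--     # Same keyboard map; total computed as the sum over all substrings of their
--     # adjacent-key path distance (double loop with a running distance), instead
--     # of the closed-form per-edge weight (i+1)*(n-i-1).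
--     rows = ["qwertyui", "pasdfghjk", "lzxcvbnm"]
--     pos = {ch: (r, c) for r, row in enumerate(rows) for c, ch in enumerate(row)}
--     t = s.lower()
--     n = len(t)
--     total = 0
--     for l in range(n):
--         running = 0
--         for r in range(l + 1, n):
--             ra, ca = pos[t[r - 1]]
--             rb, cb = pos[t[r]]
--             running += abs(ra - rb) + abs(ca - cb)
--             total += running
--     return total
-- ===== Notes on version B (the rewrite author's own statement) =====
-- stated objective: alternative
-- what changed: A multiplies each adjacent-key distance by the closed-form weight (i+1)*(n-i-1) in one pass; B instead sums, for every substring start l, a running path distance over all substring ends r (double loop), which accumulates each edge the same number of times without ever forming the product.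
import Mathlib
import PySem

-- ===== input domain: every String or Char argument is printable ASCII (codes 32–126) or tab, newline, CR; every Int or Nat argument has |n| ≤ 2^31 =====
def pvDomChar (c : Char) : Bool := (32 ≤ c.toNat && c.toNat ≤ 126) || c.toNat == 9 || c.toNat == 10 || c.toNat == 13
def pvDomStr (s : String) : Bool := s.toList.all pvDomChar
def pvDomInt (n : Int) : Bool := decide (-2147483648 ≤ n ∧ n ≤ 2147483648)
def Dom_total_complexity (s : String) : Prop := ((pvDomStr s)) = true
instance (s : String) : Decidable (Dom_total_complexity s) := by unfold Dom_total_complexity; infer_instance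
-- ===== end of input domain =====

-- B replaces A's closed-form per-edge weight (i+1)*(n-i-1) by a double loop over all
-- substring start points, accumulating a running adjacent-key path distance (objective: alternative).

-- ===== PORT A =====
-- pos = {}; for r, row in enumerate([row0, row1, row2]): for c, ch in enumerate(row): pos[ch] = (r, c)
def kbPosA : PySem.Dict Char (Int × Int) :=
  (PySem.List.enumerate [("qwertyui" : String), "pasdfghjk", "lzxcvbnm"] 0).foldl
    (fun pos rrow =>
      (PySem.List.enumerate rrow.2.toList 0).foldl
        (fun pos cch => pos.insert cch.2 (rrow.1, cch.1)) pos)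
    PySem.Dict.empty
-- dist(a, b); the `.getD (0, 0)` stands for the KeyError that Pre_ excludes
def kbDistA (a b : Char) : Int :=
  let pa := (kbPosA.get? a).getD (0, 0)
  let pb := (kbPosA.get? b).getD (0, 0)
  |pa.1 - pb.1| + |pa.2 - pb.2|
def total_complexity (s : String) : Int :=
  let n : Int := PySem.Str.len s
  let t : List Char := (PySem.Str.lower s).toList
  (PySem.List.pyRange 0 (n - 1) 1).foldl
    (fun ans i =>
      let d := kbDistA (PySem.List.pyGetD t i ' ') (PySem.List.pyGetD t (i + 1) ' ')
      let weight := (i + 1) * (n - i - 1)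
      ans + d * weight) 0
-- ===== PORT B =====
-- pos = {ch: (r, c) for r, row in enumerate(rows) for c, ch in enumerate(row)}
def kbPosB : PySem.Dict Char (Int × Int) :=
  PySem.Dict.ofList
    ((PySem.List.enumerate [("qwertyui" : String), "pasdfghjk", "lzxcvbnm"] 0).flatMap
      (fun rrow => (PySem.List.enumerate rrow.2.toList 0).map
        (fun cch => (cch.2, (rrow.1, cch.1)))))

def total_complexity_alt (s : String) : Int :=
  let t : List Char := (PySem.Str.lower s).toList
  let n : Int := (t.length : Int)
  (PySem.List.pyRange 0 n 1).foldl
    (fun total l =>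
      ((PySem.List.pyRange (l + 1) n 1).foldl
        (fun (st : Int × Int) r =>
          let pa := (kbPosB.get? (PySem.List.pyGetD t (r - 1) ' ')).getD (0, 0)
          let pb := (kbPosB.get? (PySem.List.pyGetD t r ' ')).getD (0, 0)
          let run := st.1 + (|pa.1 - pb.1| + |pa.2 - pb.2|)
          (run, st.2 + run))
        (0, total)).2)
    0

-- ===== PRECONDITION & SPEC =====
def kbChars : List Char := "qwertyuipasdfghjklzxcvbnm".toList

-- Pre_ excludes strings of length ≥ 2 containing a character whose lower-case form is not one
-- of the 25 keyboard keys: on those Python A raises KeyError (and so does B).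
def Pre_total_complexity (s : String) : Prop :=
  s.toList.length ≤ 1 ∨ ((PySem.Chars.lower s.toList).all (fun c => kbChars.contains c)) = true
instance (s : String) : Decidable (Pre_total_complexity s) := by
  unfold Pre_total_complexity; infer_instance

def pvWitness_total_complexity : String := "qWertz"

def Spec_total_complexity (s : String) (out : Int) : Prop := out = total_complexity_alt s
instance (s : String) (out : Int) : Decidable (Spec_total_complexity s out) := by unfold Spec_total_complexity; infer_instance

-- ===== CLAIM (what is proved, stated in full; the proofs are below) =====
def Claim_equal_total_complexity : Prop := ∀ (s : String), Dom_total_complexity s → Pre_total_complexity s → Spec_total_complexity s (total_complexity s)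

-- ===== LEMMAS AND PROOFS =====

-- the two keyboard position maps coincide
lemma kbPos_eq : kbPosB = kbPosA := by decide

-- edge i of the lowered character list, as both ports read it
def kbEdge (t : List Char) (i : Nat) : Int :=
  kbDistA (PySem.List.pyGetD t (i : Int) ' ') (PySem.List.pyGetD t ((i : Int) + 1) ' ')

lemma B_inner (G : Int → Int) (c : Nat) : ∀ (a run tot : Int),
    (PySem.List.pyRange a (a + c) 1).foldl
      (fun (st : Int × Int) r => (st.1 + G r, st.2 + (st.1 + G r))) (run, tot)
    = (run + ∑ j ∈ Finset.range c, G (a + j),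
       tot + ∑ j ∈ Finset.range c, (run + ∑ k ∈ Finset.range (j + 1), G (a + k))) := by
  induction c with
  | zero =>
    intro a run tot
    rw [PySem.List.pyRange_one_eq_nil (by omega)]
    simp
  | succ c ih =>
    intro a run tot
    rw [PySem.List.pyRange_one_cons (by push_cast; omega)]
    simp only [List.foldl_cons]
    push_cast
    have ha : a + ((c : Int) + 1) = (a + 1) + (c : Int) := by ring
    rw [ha, ih (a + 1) (run + G a) (tot + (run + G a)), Prod.mk.injEq]
    refine ⟨?_, ?_⟩
    · rw [Finset.sum_range_succ' (fun j => G (a + j))]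
      simp only [Nat.cast_add, Nat.cast_one, Nat.cast_zero]
      rw [add_comm (∑ j ∈ Finset.range c, G (a + (j + 1))) (G (a + 0))]
      rw [← add_assoc]
      congr 1
      · simp
      · apply Finset.sum_congr rfl
        intro j hj
        congr 1
        ring
    · rw [Finset.sum_range_succ' (fun j => run + ∑ k ∈ Finset.range (j + 1), G (a + (k : Nat)))]
      have hterm : ∀ j ∈ Finset.range c,
          run + G a + ∑ k ∈ Finset.range (j + 1), G (a + 1 + (k : Nat))
            = run + ∑ k ∈ Finset.range (j + 1 + 1), G (a + (k : Nat)) := by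
        intro j hj
        rw [Finset.sum_range_succ' (fun k => G (a + (k : Nat)))]
        have hsh : ∀ k ∈ Finset.range (j + 1), G (a + ((k + 1 : Nat) : Int)) = G (a + 1 + (k : Nat)) := by
          intro k hk
          congr 1
          push_cast
          ring
        rw [Finset.sum_congr rfl hsh]
        push_cast
        ring_nf
      rw [Finset.sum_congr rfl hterm]
      have h1 : ∑ k ∈ Finset.range (0 + 1), G (a + (k : Nat)) = G a := by simp
      rw [h1]
      ring


lemma A_eval (s : String) :
    total_complexity s =
      ∑ i ∈ Finset.range (s.toList.length - 1),
        ((i : Int) + 1) * ((s.toList.length : Int) - i - 1) *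
          kbEdge (PySem.Chars.lower s.toList) i := by
  simp only [total_complexity, PySem.Str.len_eq, PySem.Str.toList_lower]
  rw [PySem.List.pyRange_one]
  rw [List.foldl_map]
  simp only [zero_add, sub_zero]
  rw [PySem.List.foldl_add _ (fun (y : Nat) => kbDistA (PySem.List.pyGetD (PySem.Chars.lower s.toList) (y : Int) ' ') (PySem.List.pyGetD (PySem.Chars.lower s.toList) ((y : Int) + 1) ' ') * (((y : Int) + 1) * ((s.toList.length : Int) - (y : Int) - 1)))]
  have hbridge : ((List.range (s.toList.length - 1)).map (fun (i : Nat) => ((i : Int) + 1) * ((s.toList.length : Int) - i - 1) * kbEdge (PySem.Chars.lower s.toList) i)).sum = ∑ i ∈ Finset.range (s.toList.length - 1), ((i : Int) + 1) * ((s.toList.length : Int) - i - 1) * kbEdge (PySem.Chars.lower s.toList) i := rfl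
  rw [← hbridge]
  rw [zero_add]
  have htn : ((s.toList.length : Int) - 1).toNat = s.toList.length - 1 := by omega
  rw [htn]
  congr 1
  apply List.map_congr_left
  intro k hk
  simp only [kbEdge]
  ring

lemma B_eval (s : String) :
    total_complexity_alt s =
      ∑ l ∈ Finset.range s.toList.length,
        ∑ j ∈ Finset.range (s.toList.length - 1 - l),
          ∑ k ∈ Finset.range (j + 1), kbEdge (PySem.Chars.lower s.toList) (l + k) := by
  have hlen : (PySem.Chars.lower s.toList).length = s.toList.length := by
    simp [PySem.Chars.lower]
  simp only [total_complexity_alt, PySem.Str.toList_lower, kbPos_eq, hlen]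
  rw [PySem.List.pyRange_one]
  simp only [sub_zero, zero_add, Int.toNat_natCast]
  rw [List.foldl_map]
  trans (List.foldl
    (fun (acc : Int) (k : Nat) => acc +
      ∑ j ∈ Finset.range (s.toList.length - 1 - k),
        ∑ k' ∈ Finset.range (j + 1), kbEdge (PySem.Chars.lower s.toList) (k + k'))
    0 (List.range s.toList.length))
  · apply PySem.List.foldl_congr_mem
    intro acc k hk
    have hkn : k < s.toList.length := List.mem_range.mp hk
    have hb : (s.toList.length : Int) = ((k : Int) + 1) + ((s.toList.length - 1 - k : Nat) : Int) := by
      omega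
    rw [hb]
    have hstep : (fun (st : Int × Int) (r : Int) =>
        (st.1 + (|((kbPosA.get? (PySem.List.pyGetD (PySem.Chars.lower s.toList) (r - 1) ' ')).getD (0, 0)).1 - ((kbPosA.get? (PySem.List.pyGetD (PySem.Chars.lower s.toList) r ' ')).getD (0, 0)).1| + |((kbPosA.get? (PySem.List.pyGetD (PySem.Chars.lower s.toList) (r - 1) ' ')).getD (0, 0)).2 - ((kbPosA.get? (PySem.List.pyGetD (PySem.Chars.lower s.toList) r ' ')).getD (0, 0)).2|), st.2 + (st.1 + (|((kbPosA.get? (PySem.List.pyGetD (PySem.Chars.lower s.toList) (r - 1) ' ')).getD (0, 0)).1 - ((kbPosA.get? (PySem.List.pyGetD (PySem.Chars.lower s.toList) r ' ')).getD (0, 0)).1| + |((kbPosA.get? (PySem.List.pyGetD (PySem.Chars.lower s.toList) (r - 1) ' ')).getD (0, 0)).2 - ((kbPosA.get? (PySem.List.pyGetD (PySem.Chars.lower s.toList) r ' ')).getD (0, 0)).2|))))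
      = (fun (st : Int × Int) (r : Int) =>
        (st.1 + kbDistA (PySem.List.pyGetD (PySem.Chars.lower s.toList) (r - 1) ' ') (PySem.List.pyGetD (PySem.Chars.lower s.toList) r ' '), st.2 + (st.1 + kbDistA (PySem.List.pyGetD (PySem.Chars.lower s.toList) (r - 1) ' ') (PySem.List.pyGetD (PySem.Chars.lower s.toList) r ' ')))) := rfl
    rw [hstep]
    rw [B_inner (fun r => kbDistA (PySem.List.pyGetD (PySem.Chars.lower s.toList) (r - 1) ' ')
        (PySem.List.pyGetD (PySem.Chars.lower s.toList) r ' ')) (s.toList.length - 1 - k) ((k : Int) + 1) 0 acc]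
    simp only []
    congr 1
    apply Finset.sum_congr rfl
    intro j hj
    rw [zero_add]
    apply Finset.sum_congr rfl
    intro k' hk'
    simp only [kbEdge]
    congr 1
    · congr 1
      push_cast
      ring
    · congr 1
      push_cast
      ring
  · rw [PySem.List.foldl_add _ (fun (k : Nat) =>
      ∑ j ∈ Finset.range (s.toList.length - 1 - k),
        ∑ k' ∈ Finset.range (j + 1), kbEdge (PySem.Chars.lower s.toList) (k + k')) 0]
    rw [zero_add]
    exact rfl

lemma sum_tri (f : Nat → Int) (n : Nat) :
    ∑ l ∈ Finset.range n, ∑ k ∈ Finset.range (n - l), f (l + k)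
      = ∑ i ∈ Finset.range n, ((i : Int) + 1) * f i := by
  induction n with
  | zero => simp
  | succ n ih =>
    rw [Finset.sum_range_succ, Finset.sum_range_succ]
    have h1 : ∀ l ∈ Finset.range n, ∑ k ∈ Finset.range (n + 1 - l), f (l + k)
        = (∑ k ∈ Finset.range (n - l), f (l + k)) + f n := by
      intro l hl
      have hln : l < n := Finset.mem_range.mp hl
      have h2 : n + 1 - l = (n - l) + 1 := by omega
      rw [h2, Finset.sum_range_succ]
      congr 1
      congr 1
      omega
    rw [Finset.sum_congr rfl h1, Finset.sum_add_distrib, ih]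
    simp
    ring

lemma sum_key (f : Nat → Int) (n : Nat) :
    ∑ l ∈ Finset.range n, ∑ j ∈ Finset.range (n - 1 - l),
        ∑ k ∈ Finset.range (j + 1), f (l + k)
      = ∑ i ∈ Finset.range (n - 1), ((i : Int) + 1) * ((n : Int) - i - 1) * f i := by
  induction n with
  | zero => simp
  | succ n ih =>
    -- LHS(n+1) = LHS(n) + ∑_{l<n} ∑_{k<n-l} f (l+k)
    have hL : ∑ l ∈ Finset.range (n + 1), ∑ j ∈ Finset.range (n + 1 - 1 - l),
          ∑ k ∈ Finset.range (j + 1), f (l + k)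
        = (∑ l ∈ Finset.range n, ∑ j ∈ Finset.range (n - 1 - l),
            ∑ k ∈ Finset.range (j + 1), f (l + k))
          + ∑ l ∈ Finset.range n, ∑ k ∈ Finset.range (n - l), f (l + k) := by
      rw [Finset.sum_range_succ]
      have h0 : n + 1 - 1 - n = 0 := by omega
      rw [h0]
      simp only [Finset.range_zero, Finset.sum_empty, add_zero]
      rw [← Finset.sum_add_distrib]
      apply Finset.sum_congr rfl
      intro l hl
      have hln : l < n := Finset.mem_range.mp hl
      have h2 : n + 1 - 1 - l = (n - 1 - l) + 1 := by omega
      rw [h2, Finset.sum_range_succ]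
      congr 1
      have h5 : n - 1 - l + 1 = n - l := by omega
      rw [h5]
    rw [hL, ih, sum_tri]
    -- now: RHS(n) + ∑_{i<n} (i+1) f i = RHS(n+1)
    cases n with
    | zero => simp
    | succ m =>
      have h3 : m + 1 + 1 - 1 = m + 1 := by omega
      have h4 : m + 1 - 1 = m := by omega
      rw [h3, h4, Finset.sum_range_succ]
      conv_rhs => rw [Finset.sum_range_succ]
      rw [← add_assoc, ← Finset.sum_add_distrib]
      congr 1
      · apply Finset.sum_congr rfl
        intro i hi
        push_cast
        ring
      · push_cast
        ring

-- ===== VERDICT (by name: the statement is the Claim_ definition above) =====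
theorem total_complexity_spec : Claim_equal_total_complexity := by
  intro s _ _
  unfold Spec_total_complexity
  rw [A_eval, B_eval, sum_key]
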